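-- pv_equiv track=rewrite | github.com/mlcommons/algorithmic-efficiency | algorithmic_efficiency/workloads/librispeech_deepspeech/test.py | key_transform
-- ===== SOURCE A (Python) =====
-- def key_transform(k):
--   new_key = []
--   bn = False
--   for i in k:
--     bn = bn or "BatchNorm" in i
--     if 'ModuleList' in i:
--       continue
--     if 'CustomBatchNorm' in i:
--       continue
--     if 'Linear' in i:
--       if 'NonDynamicallyQuantizableLinear' in i:
--         i = 'out'
--       else:
--         i = i.replace('Linear', 'Dense')
--     elif 'Conv1d' in i:
--       i = i.replace('Conv1d', 'Conv')
--     elif 'MHSAwithQS' in i: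
--       i = i.replace('MHSAwithQS', 'SelfAttention')
--     elif 'weight' in i:
--       if bn:
--         i = i.replace('weight','scale')
--       else:
--         i = i.replace('weight', 'kernel')
--     new_key.append(i)
--   return tuple(new_key)
-- ===== SOURCE B (Python) =====
-- def _rename(i, bn):
--   if 'NonDynamicallyQuantizableLinear' in i:
--     return 'out'
--   if 'Linear' in i:
--     return i.replace('Linear', 'Dense')
--   if 'Conv1d' in i:
--     return i.replace('Conv1d', 'Conv')
--   if 'MHSAwithQS' in i:
--     return i.replace('MHSAwithQS', 'SelfAttention')
--   if 'weight' in i: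
--     return i.replace('weight', 'scale' if bn else 'kernel')
--   return i
--
-- def key_transform(k):
--   # pass 1: prefix-OR table of "a BatchNorm component has been seen up to and including j"
--   flags = []
--   seen = False
--   for s in k:
--     seen = seen or 'BatchNorm' in s
--     flags.append(seen)
--   # pass 2: filter + rename, consulting the precomputed table
--   return tuple(_rename(i, bn) for i, bn in zip(k, flags)
--                if 'ModuleList' not in i and 'CustomBatchNorm' not in i)
-- ===== Notes on version B (the rewrite author's own statement) =====
-- stated objective: alternative
-- what changed: The single stateful loop (running bn flag threaded through the filter/rename cascade) is split into two passes: a prefix-OR boolean table over the whole key, then a stateless filter+rename comprehension over zip(k, flags) with the NonDynamicallyQuantizableLinear case hoisted out of the Linear branch.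
import Mathlib
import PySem

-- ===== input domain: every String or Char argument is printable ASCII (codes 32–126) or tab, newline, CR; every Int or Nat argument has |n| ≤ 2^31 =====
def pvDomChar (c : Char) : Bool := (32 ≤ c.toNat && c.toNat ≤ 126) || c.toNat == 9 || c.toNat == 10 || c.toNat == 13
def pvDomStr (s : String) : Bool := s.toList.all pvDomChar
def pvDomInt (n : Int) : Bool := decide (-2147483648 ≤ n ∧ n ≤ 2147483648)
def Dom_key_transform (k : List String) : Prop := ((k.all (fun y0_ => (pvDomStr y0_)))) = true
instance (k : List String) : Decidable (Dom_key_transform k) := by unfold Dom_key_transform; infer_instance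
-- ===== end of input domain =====

-- B replaces A's single stateful loop by a precomputed prefix-OR flag table plus a
-- stateless filter+rename pass over zip(k, flags); same cost, different decomposition.

-- ===== PORT A =====
-- one loop iteration of A: thread (new_key, bn) through the branch cascade
def ktStepA (s : List String × Bool) (i : String) : List String × Bool :=
  let bn := s.2 || PySem.Str.isIn "BatchNorm" i
  if PySem.Str.isIn "ModuleList" i then (s.1, bn)
  else if PySem.Str.isIn "CustomBatchNorm" i then (s.1, bn)
  else
    let i' :=
      if PySem.Str.isIn "Linear" i then
        if PySem.Str.isIn "NonDynamicallyQuantizableLinear" i then "out"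
        else PySem.Str.replace i "Linear" "Dense"
      else if PySem.Str.isIn "Conv1d" i then PySem.Str.replace i "Conv1d" "Conv"
      else if PySem.Str.isIn "MHSAwithQS" i then PySem.Str.replace i "MHSAwithQS" "SelfAttention"
      else if PySem.Str.isIn "weight" i then
        if bn then PySem.Str.replace i "weight" "scale"
        else PySem.Str.replace i "weight" "kernel"
      else i
    (s.1 ++ [i'], bn)

def key_transform (k : List String) : List String :=
  (k.foldl ktStepA ([], false)).1

-- ===== PORT B =====
-- _rename of Source B
def ktRename (i : String) (bn : Bool) : String :=
  if PySem.Str.isIn "NonDynamicallyQuantizableLinear" i then "out"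
  else if PySem.Str.isIn "Linear" i then PySem.Str.replace i "Linear" "Dense"
  else if PySem.Str.isIn "Conv1d" i then PySem.Str.replace i "Conv1d" "Conv"
  else if PySem.Str.isIn "MHSAwithQS" i then PySem.Str.replace i "MHSAwithQS" "SelfAttention"
  else if PySem.Str.isIn "weight" i then
    if bn then PySem.Str.replace i "weight" "scale"
    else PySem.Str.replace i "weight" "kernel"
  else i

-- pass 1 of Source B: build the prefix-OR flag table
def ktFlagStep (p : List Bool × Bool) (s : String) : List Bool × Bool :=
  let seen := p.2 || PySem.Str.isIn "BatchNorm" s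
  (p.1 ++ [seen], seen)

def key_transform_alt (k : List String) : List String :=
  let flags := (k.foldl ktFlagStep ([], false)).1
  ((k.zip flags).filter
      (fun p => !(PySem.Str.isIn "ModuleList" p.1) && !(PySem.Str.isIn "CustomBatchNorm" p.1))).map
    (fun p => ktRename p.1 p.2)

-- ===== PRECONDITION & SPEC =====
def Spec_key_transform (k : List String) (out : List String) : Prop := out = key_transform_alt k
instance (k : List String) (out : List String) : Decidable (Spec_key_transform k out) := by unfold Spec_key_transform; infer_instance

-- ===== CLAIM (what is proved, stated in full; the proofs are below) =====
def Claim_equal_key_transform : Prop := ∀ (k : List String), Dom_key_transform k → Spec_key_transform k (key_transform k)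

-- ===== LEMMAS AND PROOFS =====

-- B's result from an arbitrary starting flag (proof-only generalisation of key_transform_alt)
def ktB (k : List String) (bn : Bool) : List String :=
  ((k.zip ((k.foldl ktFlagStep ([], bn)).1)).filter
      (fun p => !(PySem.Str.isIn "ModuleList" p.1) && !(PySem.Str.isIn "CustomBatchNorm" p.1))).map
    (fun p => ktRename p.1 p.2)

lemma flag_fold_append (k : List String) (fa : List Bool) (bn : Bool) :
    (k.foldl ktFlagStep (fa, bn)).1 = fa ++ (k.foldl ktFlagStep ([], bn)).1 := by
  induction k generalizing fa bn with
  | nil => simp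
  | cons i t ih =>
    simp only [List.foldl_cons, ktFlagStep, List.nil_append]
    rw [ih, ih [bn || PySem.Str.isIn "BatchNorm" i], List.append_assoc]

lemma ndql_linear (i : String) (h : PySem.Str.isIn "NonDynamicallyQuantizableLinear" i = true) :
    PySem.Str.isIn "Linear" i = true := by
  rw [PySem.Str.isIn_iff_infix] at h ⊢
  exact List.IsInfix.trans (by decide) h

-- A's renamed component (the branch cascade with Linear tested first) equals B's _rename
-- (NonDynamicallyQuantizableLinear hoisted out, which is sound since it contains "Linear")
lemma rename_eq (i : String) (bn : Bool) :
    (if PySem.Str.isIn "Linear" i then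
        if PySem.Str.isIn "NonDynamicallyQuantizableLinear" i then "out"
        else PySem.Str.replace i "Linear" "Dense"
      else if PySem.Str.isIn "Conv1d" i then PySem.Str.replace i "Conv1d" "Conv"
      else if PySem.Str.isIn "MHSAwithQS" i then PySem.Str.replace i "MHSAwithQS" "SelfAttention"
      else if PySem.Str.isIn "weight" i then
        if bn then PySem.Str.replace i "weight" "scale"
        else PySem.Str.replace i "weight" "kernel"
      else i) = ktRename i bn := by
  unfold ktRename
  split_ifs <;>
    first
      | rfl
      | exact absurd (ndql_linear i (by assumption)) (by assumption)

-- one A step, written as "append the contribution B would compute for this component"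
lemma stepA_eq (acc : List String) (bn : Bool) (i : String) :
    ktStepA (acc, bn) i =
      (acc ++ (if !(PySem.Str.isIn "ModuleList" i) && !(PySem.Str.isIn "CustomBatchNorm" i)
               then [ktRename i (bn || PySem.Str.isIn "BatchNorm" i)] else []),
       bn || PySem.Str.isIn "BatchNorm" i) := by
  dsimp only [ktStepA]
  cases hm : PySem.Str.isIn "ModuleList" i <;>
    cases hc : PySem.Str.isIn "CustomBatchNorm" i
  case false.false =>
    exact congrArg (fun x => (acc ++ [x], bn || PySem.Str.isIn "BatchNorm" i))
      (rename_eq i (bn || PySem.Str.isIn "BatchNorm" i))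
  all_goals simp

lemma ktB_cons (i : String) (t : List String) (bn : Bool) :
    ktB (i :: t) bn =
      (if !(PySem.Str.isIn "ModuleList" i) && !(PySem.Str.isIn "CustomBatchNorm" i)
        then [ktRename i (bn || PySem.Str.isIn "BatchNorm" i)] else [])
      ++ ktB t (bn || PySem.Str.isIn "BatchNorm" i) := by
  dsimp only [ktB, List.foldl_cons, ktFlagStep]
  rw [flag_fold_append]
  simp only [List.nil_append, List.singleton_append, List.zip_cons_cons, List.filter_cons]
  cases hm : PySem.Str.isIn "ModuleList" i <;>
    cases hc : PySem.Str.isIn "CustomBatchNorm" i <;> simp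

lemma main_fold (k : List String) (acc : List String) (bn : Bool) :
    (k.foldl ktStepA (acc, bn)).1 = acc ++ ktB k bn := by
  induction k generalizing acc bn with
  | nil => simp [ktB]
  | cons i t ih =>
    rw [ktB_cons, List.foldl_cons, stepA_eq, ih, List.append_assoc]

-- ===== VERDICT (by name: the statement is the Claim_ definition above) =====
theorem key_transform_spec : Claim_equal_key_transform := by
  intro k _
  show key_transform k = key_transform_alt k
  have hB : key_transform_alt k = ktB k false := rfl
  rw [hB, key_transform, main_fold, List.nil_append]
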